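-- pv_equiv track=rewrite | github.com/ducklin404/AI_chess | engine/pre_calculate_moves.py | pawn_attacks
-- ===== SOURCE A (Python) =====
-- def pawn_attacks(sq: int, white: bool) -> int:
--     r, f = divmod(sq, 8)
--     res = 0
--     dir = 1 if white else -1
--     for df in (-1, 1):
--         nr, nf = r + dir, f + df
--         if 0 <= nr < 8 and 0 <= nf < 8:
--             res |= 1 << (nr * 8 + nf)
--     return res
-- ===== SOURCE B (Python) =====
-- def pawn_attacks(sq: int, white: bool) -> int:
--     nr = sq // 8 + (1 if white else -1)
--     if nr < 0 or nr > 7: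
--         return 0
--     row = ((0b101 << (sq % 8)) >> 1) & 0xFF
--     return row << (8 * nr)
-- ===== Notes on version B (the rewrite author's own statement) =====
-- stated objective: idiomatic
-- what changed: Replaces the direction loop with per-square divmod bounds checks by a single destination-rank check and a precomputed 3-bit rank attack mask ((0b101 << file) >> 1 & 0xFF) shifted into place.
import Mathlib
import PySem

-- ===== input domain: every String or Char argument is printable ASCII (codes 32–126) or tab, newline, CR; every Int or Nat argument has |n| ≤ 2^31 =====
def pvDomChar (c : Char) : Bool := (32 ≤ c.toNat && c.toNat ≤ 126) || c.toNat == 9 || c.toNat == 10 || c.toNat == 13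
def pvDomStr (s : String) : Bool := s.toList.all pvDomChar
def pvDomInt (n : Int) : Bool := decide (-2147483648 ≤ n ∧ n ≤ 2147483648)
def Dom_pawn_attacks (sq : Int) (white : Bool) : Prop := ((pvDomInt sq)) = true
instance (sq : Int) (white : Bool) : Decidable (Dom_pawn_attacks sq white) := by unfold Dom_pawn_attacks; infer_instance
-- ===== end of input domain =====

-- B replaces A's two-direction loop with per-candidate bounds checks by one destination-rank
-- check plus a masked 3-bit rank pattern shifted into place (a simpler bitboard decomposition);
-- equivalence is total on the stated domain.


-- ===== PORT A =====
def pawn_attacks (sq : Int) (white : Bool) : Int :=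
  let r := PySem.Int.floordiv sq 8
  let f := PySem.Int.mod sq 8
  let res : Int := 0
  let dir : Int := if white then 1 else -1
  ([(-1 : Int), 1]).foldl (fun res df =>
    let nr := r + dir
    let nf := f + df
    if 0 ≤ nr ∧ nr < 8 ∧ 0 ≤ nf ∧ nf < 8 then
      PySem.Int.bor res (1 <<< (nr * 8 + nf).toNat)
    else res) res

-- ===== PORT B =====
def pawn_attacks_alt (sq : Int) (white : Bool) : Int :=
  let nr := PySem.Int.floordiv sq 8 + (if white then 1 else -1)
  if nr < 0 ∨ nr > 7 then 0
  else
    let row := PySem.Int.band ((5 <<< (PySem.Int.mod sq 8).toNat) >>> (1 : Nat)) 0xFF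
    row <<< (8 * nr).toNat

-- ===== PRECONDITION & SPEC =====
def Spec_pawn_attacks (sq : Int) (white : Bool) (out : Int) : Prop := out = pawn_attacks_alt sq white
instance (sq : Int) (white : Bool) (out : Int) : Decidable (Spec_pawn_attacks sq white out) := by unfold Spec_pawn_attacks; infer_instance

-- ===== CLAIM (what is proved, stated in full; the proofs are below) =====
def Claim_equal_pawn_attacks : Prop := ∀ (sq : Int) (white : Bool), Dom_pawn_attacks sq white → Spec_pawn_attacks sq white (pawn_attacks sq white)

-- ===== LEMMAS AND PROOFS =====
-- Both ports depend on sq only through r = sq // 8 and f = sq % 8 (with 0 ≤ f < 8) and on the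
-- destination rank nr = r ± 1: an off-board nr gives 0 on both sides, an on-board nr leaves a
-- finite check over the 8 × 8 possibilities for (nr, f), closed by decide.
set_option maxRecDepth 4000 in
theorem pawn_attacks_eq (sq : Int) (w : Bool) : pawn_attacks sq w = pawn_attacks_alt sq w := by
  unfold pawn_attacks pawn_attacks_alt
  simp only [List.foldl]
  have hf0 : 0 ≤ PySem.Int.mod sq 8 := PySem.Int.mod_nonneg sq (by norm_num)
  have hf8 : PySem.Int.mod sq 8 < 8 := PySem.Int.mod_lt sq (by norm_num)
  generalize hfv : PySem.Int.mod sq 8 = f at hf0 hf8 ⊢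
  generalize hrv : PySem.Int.floordiv sq 8 = r
  cases w <;> simp only [if_true, if_false, Bool.false_eq_true]
  · generalize hn : r + -1 = nr
    by_cases hb : 0 ≤ nr ∧ nr < 8
    · obtain ⟨h0, h8⟩ := hb
      interval_cases nr <;> interval_cases f <;> decide
    · split_ifs <;> first | rfl | omega
  · generalize hn : r + 1 = nr
    by_cases hb : 0 ≤ nr ∧ nr < 8
    · obtain ⟨h0, h8⟩ := hb
      interval_cases nr <;> interval_cases f <;> decide
    · split_ifs <;> first | rfl | omega

-- ===== VERDICT (by name: the statement is the Claim_ definition above) =====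
theorem pawn_attacks_spec : Claim_equal_pawn_attacks := by
  intro sq white _
  unfold Spec_pawn_attacks
  exact pawn_attacks_eq sq white
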